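-- pv_equiv track=rewrite | github.com/uprootai/AX_OCR | blueprint-ai-bom/backend/services/cost_calculator.py | _detect_treatments
-- ===== SOURCE A (Python) =====
-- from typing import Dict, List, Optional, Any
--
-- _TREATMENT_COSTS: Dict[str, float] = {
--     "QT": 800,           # 조질 (담금질+뜨임)
--     "Q.T": 800,
--     "QUENCHING": 800,
--     "TEMPERING": 500,
--     "NORMALIZING": 400,  # 노멀라이징
--     "CARBURIZING": 1200, # 침탄
--     "NITRIDING": 1500,   # 질화
--     "INDUCTION": 1000,   # 고주파 열처리
--     "CHROME": 2000,      # 크롬 도금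
--     "HARD CHROME": 2500,
--     "SPRAY": 3000,       # 용사 코팅
--     "BABBITT LINING": 5000,  # 배빗 라이닝
-- }
--
-- def _detect_treatments(description: str, material: str) -> List[str]:
--     """재질명 + 설명에서 열처리/표면처리 항목 검출 (긴 키워드 우선, 중복 제거)"""
--     combined = f"{material} {description}".upper()
--     found = []
--     # 긴 키워드 우선 매칭 (HARD CHROME > CHROME)
--     for treatment in sorted(_TREATMENT_COSTS.keys(), key=len, reverse=True):
--         if treatment in combined:
--             # 이미 상위 키워드가 잡혔으면 하위 키워드 스킵
--             if any(treatment in existing for existing in found):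
--                 continue
--             found.append(treatment)
--     return found
-- ===== SOURCE B (Python) =====
-- from typing import Dict, List
--
-- _TREATMENT_COSTS: Dict[str, float] = {
--     "QT": 800,
--     "Q.T": 800,
--     "QUENCHING": 800,
--     "TEMPERING": 500,
--     "NORMALIZING": 400,
--     "CARBURIZING": 1200,
--     "NITRIDING": 1500,
--     "INDUCTION": 1000,
--     "CHROME": 2000,
--     "HARD CHROME": 2500,
--     "SPRAY": 3000,
--     "BABBITT LINING": 5000,
-- }
--
-- def _detect_treatments(description: str, material: str) -> List[str]:
--     combined = f"{material} {description}".upper()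
--     present = [k for k in _TREATMENT_COSTS if k in combined]
--     kept = [k for k in present if not any(k != o and k in o for o in present)]
--     return sorted(kept, key=len, reverse=True)
-- ===== Notes on version B (the rewrite author's own statement) =====
-- stated objective: alternative
-- what changed: Replaces A's single length-sorted accumulator loop (whose membership test inspects the partial accumulator) with an index-first-then-filter pipeline: collect present keywords in dict order, drop those that are proper substrings of another present keyword, then stable-sort by length descending.
import Mathlib
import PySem

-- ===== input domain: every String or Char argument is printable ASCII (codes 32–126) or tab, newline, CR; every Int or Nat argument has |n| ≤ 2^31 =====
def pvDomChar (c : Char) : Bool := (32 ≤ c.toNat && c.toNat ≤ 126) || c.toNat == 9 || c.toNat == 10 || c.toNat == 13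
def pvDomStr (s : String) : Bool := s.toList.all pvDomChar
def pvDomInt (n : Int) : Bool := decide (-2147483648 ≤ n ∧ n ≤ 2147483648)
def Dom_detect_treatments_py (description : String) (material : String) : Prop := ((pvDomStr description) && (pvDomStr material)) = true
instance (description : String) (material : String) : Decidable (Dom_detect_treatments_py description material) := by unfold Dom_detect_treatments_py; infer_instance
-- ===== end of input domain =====

-- B replaces A's single length-sorted accumulator loop by an index-first-then-filter pipeline
-- (present keywords in dict order, drop proper substrings of other present keywords, stable
-- length-descending sort); same return value on all inputs, same cost class (objective: alternative).


-- ===== PORT A =====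
-- keys of _TREATMENT_COSTS in dict insertion order (the float cost values are unused by
-- _detect_treatments, so only the key list is ported)
def pvTreatmentKeys : List String :=
  ["QT", "Q.T", "QUENCHING", "TEMPERING", "NORMALIZING", "CARBURIZING",
   "NITRIDING", "INDUCTION", "CHROME", "HARD CHROME", "SPRAY", "BABBITT LINING"]

def detect_treatments_py (description : String) (material : String) : List String :=
  let combined := PySem.Str.upper (material ++ " " ++ description)
  let keysSorted := PySem.List.sorted pvTreatmentKeys (fun k => PySem.Str.len k) true
  keysSorted.foldl (fun found treatment =>
    if PySem.Str.isIn treatment combined then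
      if found.any (fun existing => PySem.Str.isIn treatment existing) then found
      else found ++ [treatment]
    else found) []

-- ===== PORT B =====
def detect_treatments_py_alt (description : String) (material : String) : List String :=
  let combined := PySem.Str.upper (material ++ " " ++ description)
  let present := pvTreatmentKeys.filter (fun k => PySem.Str.isIn k combined)
  let kept := present.filter (fun k => ! present.any (fun o => (k != o) && PySem.Str.isIn k o))
  PySem.List.sorted kept (fun k => PySem.Str.len k) true

-- ===== PRECONDITION & SPEC =====
def Spec_detect_treatments_py (description : String) (material : String) (out : List String) : Prop := out = detect_treatments_py_alt description material
instance (description : String) (material : String) (out : List String) : Decidable (Spec_detect_treatments_py description material out) := by unfold Spec_detect_treatments_py; infer_instance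

-- ===== CLAIM (what is proved, stated in full; the proofs are below) =====
def Claim_equal_detect_treatments_py : Prop := ∀ (description : String) (material : String), Dom_detect_treatments_py description material → Spec_detect_treatments_py description material (detect_treatments_py description material)

-- ===== LEMMAS AND PROOFS =====

-- segments of the length-sorted key list, split around the one proper-substring pair
-- ("CHROME" ⊂ "HARD CHROME"); all other keyword pairs are substring-free.
def pvS1 : List String := ["BABBITT LINING", "NORMALIZING", "CARBURIZING"]
def pvS2 : List String := ["QUENCHING", "TEMPERING", "NITRIDING", "INDUCTION"]
def pvS3 : List String := ["SPRAY", "Q.T", "QT"]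
def pvS : List String := pvS1 ++ ["HARD CHROME"] ++ pvS2 ++ ["CHROME"] ++ pvS3

-- the common characterisation: a keyword is kept iff it is present and it is not
-- "CHROME" shadowed by a present "HARD CHROME"
def pvP (f : String → Bool) : String → Bool :=
  fun t => f t && !(t == "CHROME" && f "HARD CHROME")

-- A's loop body, with the presence test abstracted as f
def pvStep (f : String → Bool) : List String → String → List String :=
  fun found t =>
    if f t then
      if found.any (fun e => PySem.Str.isIn t e) then found else found ++ [t]
    else found

lemma pv_sortedD :
    PySem.List.sorted pvTreatmentKeys (fun k => PySem.Str.len k) true = pvS := by decide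

lemma pv_portA (description material : String) :
    detect_treatments_py description material =
      List.foldl (pvStep (fun k => PySem.Str.isIn k (PySem.Str.upper (material ++ " " ++ description)))) []
        (PySem.List.sorted pvTreatmentKeys (fun k => PySem.Str.len k) true) := rfl

lemma pv_portB (description material : String) :
    detect_treatments_py_alt description material =
      PySem.List.sorted
        ((pvTreatmentKeys.filter (fun k => PySem.Str.isIn k (PySem.Str.upper (material ++ " " ++ description)))).filter
          (fun k => ! (pvTreatmentKeys.filter (fun k => PySem.Str.isIn k (PySem.Str.upper (material ++ " " ++ description)))).any
            (fun o => (k != o) && PySem.Str.isIn k o)))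
        (fun k => PySem.Str.len k) true := rfl

lemma pv_any_false {l : List String} {g : String → Bool}
    (h : ∀ e ∈ l, g e = false) : l.any g = false := by
  cases hl : l.any g
  · rfl
  · obtain ⟨x, hx, hgx⟩ := List.any_eq_true.1 hl
    rw [h x hx] at hgx
    cases hgx

-- substring-free runs of A's loop just append the present keywords, in order
lemma pv_run_easy (f : String → Bool) :
    ∀ (l acc : List String),
      (∀ t ∈ l, ∀ e ∈ acc, PySem.Str.isIn t e = false) →
      (∀ t ∈ l, ∀ e ∈ l, t ≠ e → PySem.Str.isIn t e = false) →
      (∀ t ∈ l, t ∉ acc) → l.Nodup →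
      List.foldl (pvStep f) acc l = acc ++ l.filter f := by
  intro l
  induction l with
  | nil => intro acc _ _ _ _; simp
  | cons t rest ih =>
    intro acc hacc hll hdisj hnd
    have htrest : t ∉ rest := (List.nodup_cons.1 hnd).1
    have hany : (acc.any (fun e => PySem.Str.isIn t e)) = false :=
      pv_any_false (fun e he => hacc t (by simp) e he)
    have hstep : pvStep f acc t = acc ++ (if f t then [t] else []) := by
      unfold pvStep; rw [hany]; cases f t <;> simp
    have harg1 : ∀ u ∈ rest, ∀ v ∈ acc ++ (if f t then [t] else []), PySem.Str.isIn u v = false := by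
      intro u hu v hv
      rcases List.mem_append.1 hv with h | h
      · exact hacc u (by simp [hu]) v h
      · have hvt : v = t := by
          cases hf : f t
          · simp [hf] at h
          · simp [hf] at h; exact h
        rw [hvt]
        exact hll u (by simp [hu]) t (by simp)
          (by rintro rfl; exact htrest hu)
    have harg2 : ∀ u ∈ rest, ∀ v ∈ rest, u ≠ v → PySem.Str.isIn u v = false := by
      intro u hu v hv
      exact hll u (by simp [hu]) v (by simp [hv])
    have harg3 : ∀ u ∈ rest, u ∉ acc ++ (if f t then [t] else []) := by
      intro u hu hm
      rcases List.mem_append.1 hm with h | h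
      · exact hdisj u (by simp [hu]) h
      · have hut : u = t := by
          cases hf : f t
          · simp [hf] at h
          · simp [hf] at h; exact h
        exact htrest (hut ▸ hu)
    rw [List.foldl_cons, hstep,
        ih (acc ++ (if f t then [t] else [])) harg1 harg2 harg3 ((List.nodup_cons.1 hnd).2)]
    cases hf : f t <;> simp [hf]

-- ===== generic: a stable reverse sort commutes with filter =====
lemma pv_insertBy_head_lt {α : Type} (key : α → Int) (x : α) (l : List α)
    (h : ∀ z ∈ l, key z < key x) :
    PySem.List.insertBy (fun a b => decide (key b < key a)) x l = x :: l := by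
  cases l with
  | nil => rfl
  | cons z zs =>
    simp [PySem.List.insertBy, h z (by simp)]

lemma pv_filter_insertBy {α : Type} (key : α → Int) (p : α → Bool) (x : α) :
    ∀ (ys : List α), ys.Pairwise (fun a b => key b ≤ key a) →
      (PySem.List.insertBy (fun a b => decide (key b < key a)) x ys).filter p =
        if p x then PySem.List.insertBy (fun a b => decide (key b < key a)) x (ys.filter p)
        else ys.filter p := by
  intro ys
  induction ys with
  | nil =>
    intro _
    cases hp : p x <;> simp [PySem.List.insertBy, hp]
  | cons y ys ih =>
    intro hpw
    have hy : ∀ z ∈ ys, key z ≤ key y := (List.pairwise_cons.1 hpw).1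
    have hpw' : ys.Pairwise (fun a b => key b ≤ key a) := (List.pairwise_cons.1 hpw).2
    by_cases hlt : key y < key x
    · have : PySem.List.insertBy (fun a b => decide (key b < key a)) x (y :: ys) = x :: y :: ys := by
        simp [PySem.List.insertBy, hlt]
      rw [this]
      cases hpx : p x
      · simp [List.filter_cons, hpx]
      · cases hpy : p y
        · have : (y :: ys).filter p = ys.filter p := by simp [hpy]
          rw [this, pv_insertBy_head_lt key x (ys.filter p)
            (by intro z hz; exact lt_of_le_of_lt (hy z (List.mem_filter.1 hz).1) hlt)]
          simp [hpx, hpy]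
        · have h2 : (y :: ys).filter p = y :: ys.filter p := by simp [hpy]
          rw [h2]
          have : PySem.List.insertBy (fun a b => decide (key b < key a)) x (y :: ys.filter p) =
              x :: y :: ys.filter p := by simp [PySem.List.insertBy, hlt]
          rw [this]
          simp [hpx, hpy]
    · have hins : PySem.List.insertBy (fun a b => decide (key b < key a)) x (y :: ys) =
          y :: PySem.List.insertBy (fun a b => decide (key b < key a)) x ys := by
        simp [PySem.List.insertBy, hlt]
      rw [hins]
      cases hpx : p x
      · cases hpy : p y <;>
          simp [hpy, ih hpw', hpx]
      · cases hpy : p y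
        · have : (y :: ys).filter p = ys.filter p := by simp [hpy]
          rw [this]
          simp [hpy, ih hpw', hpx]
        · have h2 : (y :: ys).filter p = y :: ys.filter p := by simp [hpy]
          rw [h2]
          have : PySem.List.insertBy (fun a b => decide (key b < key a)) x (y :: ys.filter p) =
              y :: PySem.List.insertBy (fun a b => decide (key b < key a)) x (ys.filter p) := by
            simp [PySem.List.insertBy, hlt]
          rw [this]
          simp [hpy, ih hpw', hpx]

lemma pv_sorted_filter_comm {α : Type} (key : α → Int) (p : α → Bool) (xs : List α) :
    PySem.List.sorted (xs.filter p) key true = (PySem.List.sorted xs key true).filter p := by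
  induction xs using List.reverseRecOn with
  | nil => simp [PySem.List.sorted_rev_eq_foldl_insertBy]
  | append_singleton xs x ih =>
    have hx : ∀ (l : List α), PySem.List.sorted (l ++ [x]) key true =
        PySem.List.insertBy (fun a b => decide (key b < key a)) x (PySem.List.sorted l key true) := by
      intro l
      rw [PySem.List.sorted_rev_eq_foldl_insertBy, List.foldl_append,
          ← PySem.List.sorted_rev_eq_foldl_insertBy]
      rfl
    have hpw : (PySem.List.sorted xs key true).Pairwise (fun a b => key b ≤ key a) :=
      PySem.List.sorted_pairwise_rev xs key
    rw [List.filter_append, hx xs, pv_filter_insertBy key p x _ hpw]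
    cases hpx : p x
    · simp [hpx, ih]
    · rw [show List.filter p [x] = [x] by simp [hpx], hx (xs.filter p), ih]
      simp

-- ===== concrete substring facts between the 12 keywords (by decide) =====
lemma pv_tab1 : ∀ t ∈ pvS1, ∀ e ∈ pvS1, t ≠ e → PySem.Str.isIn t e = false := by decide
lemma pv_tabHC : ∀ e ∈ pvS1, PySem.Str.isIn "HARD CHROME" e = false := by decide
lemma pv_tab2 : ∀ t ∈ pvS2, ∀ e ∈ pvS1 ++ ["HARD CHROME"], PySem.Str.isIn t e = false := by decide
lemma pv_tab2' : ∀ t ∈ pvS2, ∀ e ∈ pvS2, t ≠ e → PySem.Str.isIn t e = false := by decide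
lemma pv_disj2 : ∀ t ∈ pvS2, t ∉ pvS1 ++ ["HARD CHROME"] := by decide
lemma pv_tabCH1 : ∀ e ∈ pvS1, PySem.Str.isIn "CHROME" e = false := by decide
lemma pv_tabCH2 : ∀ e ∈ pvS2, PySem.Str.isIn "CHROME" e = false := by decide
lemma pv_tab3 : ∀ t ∈ pvS3, ∀ e ∈ pvS1 ++ ["HARD CHROME"] ++ pvS2 ++ ["CHROME"],
    PySem.Str.isIn t e = false := by decide
lemma pv_tab3' : ∀ t ∈ pvS3, ∀ e ∈ pvS3, t ≠ e → PySem.Str.isIn t e = false := by decide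
lemma pv_disj3 : ∀ t ∈ pvS3, t ∉ pvS1 ++ ["HARD CHROME"] ++ pvS2 ++ ["CHROME"] := by decide
lemma pv_tabB : ∀ k ∈ pvTreatmentKeys, ∀ o ∈ pvTreatmentKeys,
    ((k != o) && PySem.Str.isIn k o) = (k == "CHROME" && o == "HARD CHROME") := by decide
lemma pv_notCH1 : ∀ t ∈ pvS1, (t == "CHROME") = false := by decide
lemma pv_notCH2 : ∀ t ∈ pvS2, (t == "CHROME") = false := by decide
lemma pv_notCH3 : ∀ t ∈ pvS3, (t == "CHROME") = false := by decide

-- ===== A's loop over the sorted list computes pvS.filter (pvP f) =====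
lemma pv_mainA (f : String → Bool) :
    List.foldl (pvStep f) [] pvS = pvS.filter (pvP f) := by
  have h1 : List.foldl (pvStep f) [] pvS1 = pvS1.filter f := by
    have := pv_run_easy f pvS1 [] (by simp) pv_tab1 (by simp) (by decide)
    simpa using this
  have hmem1 : ∀ e ∈ pvS1.filter f ++ (if f "HARD CHROME" then ["HARD CHROME"] else []),
      e ∈ pvS1 ++ ["HARD CHROME"] := by
    intro e he
    rcases List.mem_append.1 he with h | h
    · exact List.mem_append.2 (Or.inl (List.mem_filter.1 h).1)
    · cases hf : f "HARD CHROME" <;> simp [hf] at h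
      simp [h]
  have h2 : pvStep f (pvS1.filter f) "HARD CHROME" =
      pvS1.filter f ++ (if f "HARD CHROME" then ["HARD CHROME"] else []) := by
    have hany : ((pvS1.filter f).any (fun e => PySem.Str.isIn "HARD CHROME" e)) = false :=
      pv_any_false (fun e he => pv_tabHC e (List.mem_filter.1 he).1)
    unfold pvStep; rw [hany]; cases f "HARD CHROME" <;> simp
  have h3 : List.foldl (pvStep f) (pvS1.filter f ++ (if f "HARD CHROME" then ["HARD CHROME"] else [])) pvS2 =
      pvS1.filter f ++ (if f "HARD CHROME" then ["HARD CHROME"] else []) ++ pvS2.filter f := by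
    refine pv_run_easy f pvS2 _ ?_ pv_tab2' ?_ (by decide)
    · intro t ht e he; exact pv_tab2 t ht e (hmem1 e he)
    · intro t ht hmem; exact pv_disj2 t ht (hmem1 t hmem)
  -- the CHROME step: the inner `any` is exactly "HARD CHROME was kept", i.e. f "HARD CHROME"
  have h4 : pvStep f (pvS1.filter f ++ (if f "HARD CHROME" then ["HARD CHROME"] else []) ++ pvS2.filter f) "CHROME" =
      pvS1.filter f ++ (if f "HARD CHROME" then ["HARD CHROME"] else []) ++ pvS2.filter f ++
        (if f "CHROME" && !(f "HARD CHROME") then ["CHROME"] else []) := by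
    have ha1 : ((pvS1.filter f).any (fun e => PySem.Str.isIn "CHROME" e)) = false :=
      pv_any_false (fun e he => pv_tabCH1 e (List.mem_filter.1 he).1)
    have ha2 : ((pvS2.filter f).any (fun e => PySem.Str.isIn "CHROME" e)) = false :=
      pv_any_false (fun e he => pv_tabCH2 e (List.mem_filter.1 he).1)
    have hin : PySem.Str.isIn "CHROME" "HARD CHROME" = true := by decide
    have hanyC : ((pvS1.filter f ++ (if f "HARD CHROME" then ["HARD CHROME"] else []) ++ pvS2.filter f).any
        (fun e => PySem.Str.isIn "CHROME" e)) = f "HARD CHROME" := by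
      rw [List.any_append, List.any_append, ha1, ha2]
      cases hHC : f "HARD CHROME"
      · decide
      · decide
    unfold pvStep
    rw [hanyC]
    cases hHC : f "HARD CHROME" <;> cases hCH : f "CHROME" <;> simp
  have h5 : List.foldl (pvStep f)
      (pvS1.filter f ++ (if f "HARD CHROME" then ["HARD CHROME"] else []) ++ pvS2.filter f ++
        (if f "CHROME" && !(f "HARD CHROME") then ["CHROME"] else [])) pvS3 =
      pvS1.filter f ++ (if f "HARD CHROME" then ["HARD CHROME"] else []) ++ pvS2.filter f ++
        (if f "CHROME" && !(f "HARD CHROME") then ["CHROME"] else []) ++ pvS3.filter f := by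
    have hmem : ∀ e ∈ pvS1.filter f ++ (if f "HARD CHROME" then ["HARD CHROME"] else []) ++ pvS2.filter f ++
        (if f "CHROME" && !(f "HARD CHROME") then ["CHROME"] else []),
        e ∈ pvS1 ++ ["HARD CHROME"] ++ pvS2 ++ ["CHROME"] := by
      intro e he
      rcases List.mem_append.1 he with he | he
      · rcases List.mem_append.1 he with he | he
        · rcases List.mem_append.1 he with he | he
          · exact by simp [List.mem_append, (List.mem_filter.1 he).1]
          · cases hf : f "HARD CHROME" <;> simp [hf] at he
            simp [he]
        · exact by simp [List.mem_append, (List.mem_filter.1 he).1]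
      · cases hf : (f "CHROME" && !(f "HARD CHROME")) <;> simp [hf] at he
        simp [he]
    refine pv_run_easy f pvS3 _ ?_ pv_tab3' ?_ (by decide)
    · intro t ht e he; exact pv_tab3 t ht e (hmem e he)
    · intro t ht hm; exact pv_disj3 t ht (hmem t hm)
  have hfil1 : pvS1.filter (pvP f) = pvS1.filter f :=
    List.filter_congr (by intro t ht; simp [pvP, pv_notCH1 t ht])
  have hfil2 : pvS2.filter (pvP f) = pvS2.filter f :=
    List.filter_congr (by intro t ht; simp [pvP, pv_notCH2 t ht])
  have hfil3 : pvS3.filter (pvP f) = pvS3.filter f :=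
    List.filter_congr (by intro t ht; simp [pvP, pv_notCH3 t ht])
  have hfilHC : ["HARD CHROME"].filter (pvP f) = (if f "HARD CHROME" then ["HARD CHROME"] else []) := by
    cases hf : f "HARD CHROME" <;> simp [pvP, hf]
  have hfilCH : ["CHROME"].filter (pvP f) = (if f "CHROME" && !(f "HARD CHROME") then ["CHROME"] else []) := by
    cases hf : f "HARD CHROME" <;> cases hc : f "CHROME" <;> simp [pvP, hf, hc]
  show List.foldl (pvStep f) [] (pvS1 ++ ["HARD CHROME"] ++ pvS2 ++ ["CHROME"] ++ pvS3) = _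
  rw [List.foldl_append, List.foldl_append, List.foldl_append, List.foldl_append,
      h1]
  have h2' : List.foldl (pvStep f) (pvS1.filter f) ["HARD CHROME"] =
      pvS1.filter f ++ (if f "HARD CHROME" then ["HARD CHROME"] else []) := by
    simpa [List.foldl_cons] using h2
  have h4' : List.foldl (pvStep f)
      (pvS1.filter f ++ (if f "HARD CHROME" then ["HARD CHROME"] else []) ++ pvS2.filter f) ["CHROME"] =
      pvS1.filter f ++ (if f "HARD CHROME" then ["HARD CHROME"] else []) ++ pvS2.filter f ++
        (if f "CHROME" && !(f "HARD CHROME") then ["CHROME"] else []) := by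
    simpa [List.foldl_cons] using h4
  rw [h2', h3, h4', h5]
  show _ = (pvS1 ++ ["HARD CHROME"] ++ pvS2 ++ ["CHROME"] ++ pvS3).filter (pvP f)
  rw [List.filter_append, List.filter_append, List.filter_append, List.filter_append,
      hfil1, hfil2, hfil3, hfilHC, hfilCH]

-- ===== B's two filters compute pvTreatmentKeys.filter (pvP f) =====
lemma pv_mainB (f : String → Bool) :
    ((pvTreatmentKeys.filter f).filter
        (fun k => ! (pvTreatmentKeys.filter f).any (fun o => (k != o) && PySem.Str.isIn k o))) =
      pvTreatmentKeys.filter (pvP f) := by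
  rw [List.filter_filter]
  refine List.filter_congr ?_
  intro k hk
  have hany : ((pvTreatmentKeys.filter f).any (fun o => (k != o) && PySem.Str.isIn k o)) =
      (k == "CHROME" && f "HARD CHROME") := by
    cases hc : (k == "CHROME" && f "HARD CHROME")
    · rw [List.any_eq_false]
      intro o ho
      have hoD := (List.mem_filter.1 ho).1
      have hof := (List.mem_filter.1 ho).2
      rw [pv_tabB k hk o hoD]
      cases hk1 : (k == "CHROME")
      · simp
      · cases ho1 : (o == "HARD CHROME")
        · simp
        · exfalso
          have : o = "HARD CHROME" := by simpa using ho1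
          subst this
          simp [hk1, hof] at hc
    · have hkC : k = "CHROME" := by
        have := hc
        cases hk1 : (k == "CHROME")
        · simp [hk1] at hc
        · simpa using hk1
      have hHC : f "HARD CHROME" = true := by
        cases hf : f "HARD CHROME"
        · simp [hf] at hc
        · rfl
      rw [List.any_eq_true]
      refine ⟨"HARD CHROME", List.mem_filter.2 ⟨by decide, hHC⟩, ?_⟩
      subst hkC
      decide
  rw [hany]
  simp [pvP, Bool.and_comm]

-- ===== VERDICT (by name: the statement is the Claim_ definition above) =====
theorem detect_treatments_py_spec : Claim_equal_detect_treatments_py := by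
  intro description material _
  unfold Spec_detect_treatments_py
  rw [pv_portA, pv_portB, pv_sortedD, pv_mainA, pv_mainB,
      pv_sorted_filter_comm (fun k => PySem.Str.len k) (pvP (fun k => PySem.Str.isIn k (PySem.Str.upper (material ++ " " ++ description)))) pvTreatmentKeys,
      pv_sortedD]
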